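-- pv_equiv track=rewrite | github.com/OmarAlmighty/Introduction-to-Programming-Using-Python-Liang-1st-edtion | CH10/EX10.27.py | isConsecutiveFour
-- ===== SOURCE A (Python) =====
-- def isConsecutiveFour(values):
--     if len(values) != len(set(values)):  # there are duplicates
--         return False
--     diff = values[0] - values[1]
--     for i in range(len(values) - 1):
--         if values[i] - values[i + 1] != diff:
--             return False
--     return True
-- ===== SOURCE B (Python) =====
-- def isConsecutiveFour(values):
--     diff = values[0] - values[1]
--     return diff != 0 and all(x - y == diff for x, y in zip(values, values[1:]))
-- ===== Notes on version B (the rewrite author's own statement) =====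
-- stated objective: simpler
-- what changed: Drops the auxiliary set-based duplicate check entirely: a constant nonzero first difference already forces distinct integers, so B just computes diff = values[0]-values[1], rejects diff == 0, and checks all consecutive pairs with zip/all.
import Mathlib
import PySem

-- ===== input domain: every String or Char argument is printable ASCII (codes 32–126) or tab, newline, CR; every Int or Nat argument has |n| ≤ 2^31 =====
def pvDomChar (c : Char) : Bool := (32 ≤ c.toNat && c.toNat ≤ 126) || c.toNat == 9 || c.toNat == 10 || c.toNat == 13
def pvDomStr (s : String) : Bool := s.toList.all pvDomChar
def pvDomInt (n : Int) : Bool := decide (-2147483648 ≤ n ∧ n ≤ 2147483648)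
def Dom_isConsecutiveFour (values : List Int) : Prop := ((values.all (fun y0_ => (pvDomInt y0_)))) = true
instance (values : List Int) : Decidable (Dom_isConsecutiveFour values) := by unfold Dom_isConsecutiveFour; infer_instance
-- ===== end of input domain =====

-- B drops A's set-based duplicate check (a constant nonzero difference already forces
-- distinct integers) and checks consecutive differences with zip/all: simpler, same cost.

-- ===== PORT A =====
-- 'for i in range(len(values)-1): if values[i]-values[i+1] != diff: return False' as structural
-- recursion over the range list; indexing is pyGet? (always in range for these i under Pre_).
def pvALoop (values : List Int) (diff : Int) : List Int → Bool
  | [] => true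
  | i :: rest =>
    if ((PySem.List.pyGet? values i).getD 0 - (PySem.List.pyGet? values (i + 1)).getD 0) ≠ diff
    then false
    else pvALoop values diff rest

def isConsecutiveFour (values : List Int) : Bool :=
  if values.length ≠ (PySem.Set.ofList values).length then false
  else
    let diff := (PySem.List.pyGet? values 0).getD 0 - (PySem.List.pyGet? values 1).getD 0
    pvALoop values diff (PySem.List.pyRange 0 ((values.length : Int) - 1) 1)

-- ===== PORT B =====
def isConsecutiveFour_alt (values : List Int) : Bool :=
  let diff := (PySem.List.pyGet? values 0).getD 0 - (PySem.List.pyGet? values 1).getD 0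
  decide (diff ≠ 0) &&
    (values.zip (PySem.List.slice values (some 1) none)).all (fun p => p.1 - p.2 == diff)

-- ===== PRECONDITION & SPEC =====
-- A (and B) raise IndexError on lists of length 0 or 1 (values[0]/values[1]).
def Pre_isConsecutiveFour (values : List Int) : Prop := 2 ≤ values.length
instance (values : List Int) : Decidable (Pre_isConsecutiveFour values) := by
  unfold Pre_isConsecutiveFour; infer_instance

def pvWitness_isConsecutiveFour : List Int := [5, 3, 1, -1]

def Spec_isConsecutiveFour (values : List Int) (out : Bool) : Prop := out = isConsecutiveFour_alt values
instance (values : List Int) (out : Bool) : Decidable (Spec_isConsecutiveFour values out) := by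
  unfold Spec_isConsecutiveFour; infer_instance

-- ===== CLAIM (what is proved, stated in full; the proofs are below) =====
def Claim_equal_isConsecutiveFour : Prop := ∀ (values : List Int), Dom_isConsecutiveFour values → Pre_isConsecutiveFour values → Spec_isConsecutiveFour values (isConsecutiveFour values)

-- ===== LEMMAS AND PROOFS =====

-- canonical "every consecutive difference equals diff" predicate, the bridge between the two ports
def pvChain (diff : Int) : List Int → Bool
  | x :: y :: t => (x - y == diff) && pvChain diff (y :: t)
  | _ => true

lemma pvChain_short (diff : Int) (v : List Int) (h : v.length ≤ 1) : pvChain diff v = true := by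
  match v with
  | [] => rfl
  | [_] => rfl
  | _ :: _ :: _ => simp at h

lemma pvChain_tail (diff x : Int) (t : List Int) (h : pvChain diff (x :: t) = true) :
    pvChain diff t = true := by
  match t, h with
  | [], _ => rfl
  | y :: t', h =>
    rw [pvChain, Bool.and_eq_true] at h
    exact h.2

-- A's range loop computes pvChain
lemma pvALoop_eq_chain (v : List Int) (diff : Int) :
    ∀ (m k : Nat), v.length - k ≤ m →
      pvALoop v diff (PySem.List.pyRange (k : Int) ((v.length : Int) - 1) 1) =
        pvChain diff (v.drop k) := by
  intro m
  induction m with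
  | zero =>
    intro k hk
    have hlen : v.length ≤ k := by omega
    rw [PySem.List.pyRange_one_eq_nil (by omega)]
    rw [List.drop_eq_nil_of_le hlen]
    rfl
  | succ m ih =>
    intro k hk
    by_cases h : k + 1 < v.length
    · have h1 : (k : Int) < (v.length : Int) - 1 := by omega
      rw [PySem.List.pyRange_one_cons h1]
      have hk0 : k < v.length := by omega
      rw [pvALoop]
      have e1 : PySem.List.pyGet? v (k : Int) = v[k]? := PySem.List.pyGet?_natCast v k
      have e2 : PySem.List.pyGet? v ((k : Int) + 1) = v[k + 1]? := by
        rw [show ((k : Int) + 1) = ((k + 1 : Nat) : Int) by push_cast; ring]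
        exact PySem.List.pyGet?_natCast v (k + 1)
      rw [e1, e2, List.getElem?_eq_getElem hk0, List.getElem?_eq_getElem h]
      have e3 : ((k : Int) + 1) = (((k + 1 : Nat) : Nat) : Int) := by push_cast; ring
      rw [e3, ih (k + 1) (by omega)]
      rw [List.drop_eq_getElem_cons hk0, List.drop_eq_getElem_cons h]
      rw [pvChain]
      simp only [Option.getD_some]
      by_cases hd : v[k] - v[k + 1] = diff
      · simp [hd]
      · simp [hd]
    · rw [PySem.List.pyRange_one_eq_nil (by omega)]
      rw [pvChain_short diff _ (by simp; omega)]
      rfl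

-- B's zip/all computes pvChain
lemma zip_all_eq_chain (diff : Int) :
    ∀ (v : List Int), (v.zip v.tail).all (fun p => p.1 - p.2 == diff) = pvChain diff v := by
  intro v
  induction v with
  | nil => rfl
  | cons x t ih =>
    match t, ih with
    | [], _ => rfl
    | y :: t', ih =>
      show ((x, y) :: (y :: t').zip t').all _ = _
      rw [List.all_cons, pvChain]
      have : (y :: t').zip t' = (y :: t').zip (y :: t').tail := rfl
      rw [this, ih]

-- on a true chain, head minus any later element is a positive multiple of diff
lemma pvChain_head_sub (diff : Int) :
    ∀ (t : List Int) (x : Int), pvChain diff (x :: t) = true →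
      ∀ y ∈ t, ∃ k : Nat, 1 ≤ k ∧ x - y = (k : Int) * diff := by
  intro t
  induction t with
  | nil => intro x _ y hy; simp at hy
  | cons y t' ih =>
    intro x hc z hz
    rw [pvChain, Bool.and_eq_true, beq_iff_eq] at hc
    rcases List.mem_cons.mp hz with rfl | hz'
    · exact ⟨1, le_refl 1, by rw [Nat.cast_one, one_mul]; exact hc.1⟩
    · obtain ⟨k, hk1, hk⟩ := ih y hc.2 z hz'
      refine ⟨k + 1, by omega, ?_⟩
      have : x - z = (x - y) + (y - z) := by ring
      rw [this, hc.1, hk]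
      push_cast
      ring

-- a true chain with nonzero difference has no duplicates
lemma chain_nodup (diff : Int) (hd : diff ≠ 0) :
    ∀ (v : List Int), pvChain diff v = true → v.Nodup := by
  intro v
  induction v with
  | nil => intro _; exact List.Pairwise.nil
  | cons x t ih =>
    intro hc
    refine List.Pairwise.cons ?_ (ih (pvChain_tail diff x t hc))
    intro y hy heq
    obtain ⟨k, hk1, hk⟩ := pvChain_head_sub diff t x hc y hy
    have hkz : (k : Int) ≠ 0 := by exact_mod_cast Nat.one_le_iff_ne_zero.mp hk1
    have : (k : Int) * diff ≠ 0 := mul_ne_zero hkz hd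
    rw [← hk] at this
    omega

-- a true chain with zero difference means all elements equal the head
lemma chain_zero_ofList (a : Int) :
    ∀ (t : List Int), pvChain 0 (a :: t) = true → PySem.Set.ofList (a :: t) = [a] := by
  intro t
  induction t generalizing a with
  | nil => intro _; rfl
  | cons y t' ih =>
    intro hc
    rw [pvChain, Bool.and_eq_true, beq_iff_eq] at hc
    have hay : a = y := by omega
    subst hay
    have h1 : PySem.Set.ofList (a :: t') = [a] := ih a hc.2
    rw [PySem.Set.ofList_cons, h1]
    simp [PySem.Set.discard]

-- ===== VERDICT (by name: the statement is the Claim_ definition above) =====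
theorem isConsecutiveFour_spec : Claim_equal_isConsecutiveFour := by
  intro values _ hpre
  unfold Pre_isConsecutiveFour at hpre
  unfold Spec_isConsecutiveFour
  cases values with
  | nil => simp at hpre
  | cons a t =>
  cases t with
  | nil => simp at hpre
  | cons b rest =>
  have hget0 : (PySem.List.pyGet? (a :: b :: rest) (0 : Int)).getD 0 = a := by
    have h := PySem.List.pyGet?_natCast (a :: b :: rest) 0
    rw [Nat.cast_zero] at h
    rw [h]
    rfl
  have hget1 : (PySem.List.pyGet? (a :: b :: rest) (1 : Int)).getD 0 = b := by
    have h := PySem.List.pyGet?_natCast (a :: b :: rest) 1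
    rw [Nat.cast_one] at h
    rw [h]
    rfl
  have hB : isConsecutiveFour_alt (a :: b :: rest) =
      (decide (a - b ≠ 0) && pvChain (a - b) (a :: b :: rest)) := by
    unfold isConsecutiveFour_alt
    rw [hget0, hget1, PySem.List.slice_from_one]
    show (decide (a - b ≠ 0) &&
      ((a :: b :: rest).zip (a :: b :: rest).tail).all (fun p => p.1 - p.2 == (a - b))) = _
    rw [zip_all_eq_chain]
  have hloop : pvALoop (a :: b :: rest) (a - b)
      (PySem.List.pyRange (0 : Int) (((a :: b :: rest).length : Int) - 1) 1) =
      pvChain (a - b) (a :: b :: rest) := by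
    have h := pvALoop_eq_chain (a :: b :: rest) (a - b) (a :: b :: rest).length 0 (by omega)
    rw [Nat.cast_zero] at h
    rw [h]
    rfl
  by_cases hc : pvChain (a - b) (a :: b :: rest) = true
  · by_cases hz : a - b = 0
    · -- all elements equal: A's duplicate test fires, B's diff ≠ 0 test fires
      have hset : PySem.Set.ofList (a :: b :: rest) = [a] :=
        chain_zero_ofList a (b :: rest) (hz ▸ hc)
      unfold isConsecutiveFour
      rw [if_pos (by rw [hset]; simp)]
      rw [hB, hz]
      simp
    · -- real arithmetic sequence: both return true
      have hnodup : (a :: b :: rest).Nodup := chain_nodup (a - b) hz _ hc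
      unfold isConsecutiveFour
      rw [if_neg (by rw [PySem.Set.ofList_eq_self_of_nodup _ hnodup]; simp)]
      rw [hget0, hget1]
      show pvALoop (a :: b :: rest) (a - b)
        (PySem.List.pyRange (0 : Int) (((a :: b :: rest).length : Int) - 1) 1) = _
      rw [hloop, hB, hc]
      simp [hz]
  · -- chain broken: A's loop (or its duplicate test) and B's all both return false
    have hc' : pvChain (a - b) (a :: b :: rest) = false := by
      cases h : pvChain (a - b) (a :: b :: rest)
      · rfl
      · exact absurd h hc
    have hBfalse : isConsecutiveFour_alt (a :: b :: rest) = false := by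
      rw [hB, hc']
      simp
    rw [hBfalse]
    unfold isConsecutiveFour
    by_cases hdup : (a :: b :: rest).length ≠ (PySem.Set.ofList (a :: b :: rest)).length
    · rw [if_pos hdup]
    · rw [if_neg hdup]
      rw [hget0, hget1]
      show pvALoop (a :: b :: rest) (a - b)
        (PySem.List.pyRange (0 : Int) (((a :: b :: rest).length : Int) - 1) 1) = false
      rw [hloop, hc']
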